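-- pv_equiv track=rewrite | github.com/megascienta/sciona | validations/reducers/validation/orchestrator.py | _resolution_failure_taxonomy
-- ===== SOURCE A (Python) =====
-- def _resolution_failure_taxonomy(rows: list[dict]) -> dict:
--     dropped: dict[str, int] = {}
--     accepted: dict[str, int] = {}
--     candidate_histogram: dict[str, int] = {}
--     for row in rows:
--         for reason, count in (row.get("strict_contract_dropped_by_reason") or {}).items():
--             dropped[reason] = dropped.get(reason, 0) + int(count or 0)
--         for provenance, count in (row.get("strict_contract_accepted_by_provenance") or {}).items():
--             accepted[provenance] = accepted.get(provenance, 0) + int(count or 0)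
--         for bucket, count in (row.get("strict_contract_candidate_count_histogram") or {}).items():
--             candidate_histogram[bucket] = candidate_histogram.get(bucket, 0) + int(count or 0)
--     return {
--         "strict_contract_dropped_by_reason": dropped,
--         "strict_contract_accepted_by_provenance": accepted,
--         "strict_contract_candidate_count_histogram": candidate_histogram,
--     }
-- ===== SOURCE B (Python) =====
-- def _sum_field(rows: list[dict], key: str) -> dict:
--     acc: dict[str, int] = {}
--     for row in rows:
--         for k, count in (row.get(key) or {}).items():
--             acc[k] = acc.get(k, 0) + int(count or 0)
--     return acc
--
--
-- def _resolution_failure_taxonomy(rows: list[dict]) -> dict: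
--     return {
--         "strict_contract_dropped_by_reason": _sum_field(rows, "strict_contract_dropped_by_reason"),
--         "strict_contract_accepted_by_provenance": _sum_field(rows, "strict_contract_accepted_by_provenance"),
--         "strict_contract_candidate_count_histogram": _sum_field(rows, "strict_contract_candidate_count_histogram"),
--     }
-- ===== Notes on version B (the rewrite author's own statement) =====
-- stated objective: simpler
-- what changed: Replaces the single interleaved pass maintaining three accumulator dicts with one generic helper _sum_field(rows, key) called three times, one independent pass per field.
import Mathlib
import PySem

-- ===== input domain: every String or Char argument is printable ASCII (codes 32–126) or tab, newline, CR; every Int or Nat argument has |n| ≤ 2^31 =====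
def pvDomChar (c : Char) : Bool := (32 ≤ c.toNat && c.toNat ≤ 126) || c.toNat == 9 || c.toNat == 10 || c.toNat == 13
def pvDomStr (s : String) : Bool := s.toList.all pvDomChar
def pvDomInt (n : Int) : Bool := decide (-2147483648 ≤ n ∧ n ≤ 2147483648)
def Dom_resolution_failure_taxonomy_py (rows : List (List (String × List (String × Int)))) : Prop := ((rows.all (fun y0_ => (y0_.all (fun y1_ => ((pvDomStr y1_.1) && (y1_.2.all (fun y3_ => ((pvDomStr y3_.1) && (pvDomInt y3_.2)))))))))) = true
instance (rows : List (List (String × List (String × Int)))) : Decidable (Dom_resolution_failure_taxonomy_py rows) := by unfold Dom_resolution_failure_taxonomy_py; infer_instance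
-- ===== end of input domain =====

-- B restructures A's single pass with three interleaved accumulators into a generic
-- per-field helper run in three separate passes; same results, simpler code.

-- ===== PORT A =====
-- `int(count or 0)` on an int argument: 0 if count == 0 else count (exact for Python ints)
def pvIntOrZero (c : Int) : Int := if c == 0 then 0 else c

-- port of A: one foldl over rows, state = the three accumulator dicts; each row's three
-- inner loops fold over `(row.get(key) or {}).items()` = (Dict.mk row).getD key []
def resolution_failure_taxonomy_py (rows : List (List (String × List (String × Int)))) : List (String × List (String × Int)) :=
  let st := rows.foldl
    (fun (st : PySem.Dict String Int × PySem.Dict String Int × PySem.Dict String Int) row =>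
      (((PySem.Dict.mk row).getD "strict_contract_dropped_by_reason" []).foldl
          (fun d p => d.insert p.1 (d.getD p.1 0 + pvIntOrZero p.2)) st.1,
       ((PySem.Dict.mk row).getD "strict_contract_accepted_by_provenance" []).foldl
          (fun d p => d.insert p.1 (d.getD p.1 0 + pvIntOrZero p.2)) st.2.1,
       ((PySem.Dict.mk row).getD "strict_contract_candidate_count_histogram" []).foldl
          (fun d p => d.insert p.1 (d.getD p.1 0 + pvIntOrZero p.2)) st.2.2))
    (PySem.Dict.empty, PySem.Dict.empty, PySem.Dict.empty)
  [("strict_contract_dropped_by_reason", st.1.items),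
   ("strict_contract_accepted_by_provenance", st.2.1.items),
   ("strict_contract_candidate_count_histogram", st.2.2.items)]

-- ===== PORT B =====
-- port of Source B's helper _sum_field: one pass over rows for ONE field
def pvSumField (rows : List (List (String × List (String × Int)))) (key : String) : PySem.Dict String Int :=
  rows.foldl
    (fun acc row =>
      ((PySem.Dict.mk row).getD key []).foldl
        (fun acc p => acc.insert p.1 (acc.getD p.1 0 + pvIntOrZero p.2)) acc)
    PySem.Dict.empty

def resolution_failure_taxonomy_py_alt (rows : List (List (String × List (String × Int)))) : List (String × List (String × Int)) :=
  [("strict_contract_dropped_by_reason", (pvSumField rows "strict_contract_dropped_by_reason").items),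
   ("strict_contract_accepted_by_provenance", (pvSumField rows "strict_contract_accepted_by_provenance").items),
   ("strict_contract_candidate_count_histogram", (pvSumField rows "strict_contract_candidate_count_histogram").items)]

-- ===== PRECONDITION & SPEC =====
def Spec_resolution_failure_taxonomy_py (rows : List (List (String × List (String × Int)))) (out : List (String × List (String × Int))) : Prop := out = resolution_failure_taxonomy_py_alt rows
instance (rows : List (List (String × List (String × Int)))) (out : List (String × List (String × Int))) : Decidable (Spec_resolution_failure_taxonomy_py rows out) := by unfold Spec_resolution_failure_taxonomy_py; infer_instance

-- ===== CLAIM (what is proved, stated in full; the proofs are below) =====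
def Claim_equal_resolution_failure_taxonomy_py : Prop := ∀ (rows : List (List (String × List (String × Int)))), Dom_resolution_failure_taxonomy_py rows → Spec_resolution_failure_taxonomy_py rows (resolution_failure_taxonomy_py rows)

-- ===== LEMMAS AND PROOFS =====
-- A's fold over a product state with componentwise updates is the triple of the three
-- separate folds (B's three passes).
theorem pv_foldl_prod3 {α β γ ρ : Type} (f : α → ρ → α) (g : β → ρ → β) (h : γ → ρ → γ)
    (rows : List ρ) (a : α) (b : β) (c : γ) :
    rows.foldl (fun st r => (f st.1 r, g st.2.1 r, h st.2.2 r)) (a, b, c) =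
      (rows.foldl f a, rows.foldl g b, rows.foldl h c) := by
  induction rows generalizing a b c with
  | nil => rfl
  | cons r rs ih => simpa using ih (f a r) (g b r) (h c r)

-- ===== VERDICT (by name: the statement is the Claim_ definition above) =====
theorem resolution_failure_taxonomy_py_spec : Claim_equal_resolution_failure_taxonomy_py := by
  intro rows _
  show resolution_failure_taxonomy_py rows = resolution_failure_taxonomy_py_alt rows
  exact congrArg
    (fun st : PySem.Dict String Int × PySem.Dict String Int × PySem.Dict String Int =>
      [("strict_contract_dropped_by_reason", st.1.items),
       ("strict_contract_accepted_by_provenance", st.2.1.items),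
       ("strict_contract_candidate_count_histogram", st.2.2.items)])
    (pv_foldl_prod3
      (fun d row => ((PySem.Dict.mk row).getD "strict_contract_dropped_by_reason" []).foldl
         (fun d p => d.insert p.1 (d.getD p.1 0 + pvIntOrZero p.2)) d)
      (fun d row => ((PySem.Dict.mk row).getD "strict_contract_accepted_by_provenance" []).foldl
         (fun d p => d.insert p.1 (d.getD p.1 0 + pvIntOrZero p.2)) d)
      (fun d row => ((PySem.Dict.mk row).getD "strict_contract_candidate_count_histogram" []).foldl
         (fun d p => d.insert p.1 (d.getD p.1 0 + pvIntOrZero p.2)) d)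
      rows PySem.Dict.empty PySem.Dict.empty PySem.Dict.empty)
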